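-- pv_equiv track=rewrite | github.com/jong-seoung/BaekJoon | 프로그래머스/3/12938. 최고의 집합/최고의 집합.py | solution
-- ===== SOURCE A (Python) =====
-- def solution(n, s):
--     # 최대 값 계산
--     mox = s // n
--     na = s % n
--
--     # mox가 0 이하인 경우 균등하게 나눌 수 없음
--     if mox <= 0:
--         return [-1]
--
--     # 기본 값을 모두 mox로 초기화
--     answer = [mox] * n
--
--     # 나머지 값을 앞에서부터 분배
--     for i in range(na):
--         answer[i] += 1
--
--     # 결과 반환 (정렬하여 균등 분배 확인 가능)
--     return sorted(answer)
-- ===== SOURCE B (Python) =====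
-- def solution(n, s):
--     if s // n <= 0:
--         return [-1]
--     # greedy: each slot takes floor(remaining sum / slots left); yields the nondecreasing equal split
--     answer = []
--     for k in range(n, 0, -1):
--         v = s // k
--         answer.append(v)
--         s -= v
--     return answer
-- ===== Notes on version B (the rewrite author's own statement) =====
-- stated objective: alternative
-- what changed: Instead of filling [mox]*n, incrementing the first na entries and sorting, B runs a greedy loop giving each slot floor(remaining sum / slots left), which emits the nondecreasing equal split directly with no increment pass and no sort.
import Mathlib
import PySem

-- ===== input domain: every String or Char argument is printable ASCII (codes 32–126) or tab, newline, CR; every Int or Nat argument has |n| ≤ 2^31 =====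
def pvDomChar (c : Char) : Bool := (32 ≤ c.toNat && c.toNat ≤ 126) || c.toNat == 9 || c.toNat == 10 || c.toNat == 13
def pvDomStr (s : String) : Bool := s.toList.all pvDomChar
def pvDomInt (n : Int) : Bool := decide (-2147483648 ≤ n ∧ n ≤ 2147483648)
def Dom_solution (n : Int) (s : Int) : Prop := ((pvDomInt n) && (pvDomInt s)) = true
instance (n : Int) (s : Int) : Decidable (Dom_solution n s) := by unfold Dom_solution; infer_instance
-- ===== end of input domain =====

-- B replaces A's fill/increment/sort with a greedy loop that gives each slot floor(remaining/slots-left), already sorted (alternative algorithm).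


-- ===== PORT A =====
def solution (n : Int) (s : Int) : List Int :=
  let mox := PySem.Int.floordiv s n
  let na := PySem.Int.mod s n
  if mox ≤ 0 then [-1]
  else
    let answer := List.replicate n.toNat mox
    let answer := (PySem.List.pyRange 0 na 1).foldl
      (fun acc i => PySem.List.pySetD acc i (PySem.List.pyGetD acc i 0 + 1)) answer
    PySem.List.sorted answer id false

-- ===== PORT B =====
def solution_alt (n : Int) (s : Int) : List Int :=
  if PySem.Int.floordiv s n ≤ 0 then [-1]
  else
    ((PySem.List.pyRange n 0 (-1)).foldl
      (fun (st : List Int × Int) k =>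
        let v := PySem.Int.floordiv st.2 k
        (st.1 ++ [v], st.2 - v)) ([], s)).1

-- ===== PRECONDITION & SPEC =====
-- Pre_ excludes exactly n = 0, where Python's s // n raises ZeroDivisionError (in both A and B).
def Pre_solution (n : Int) (s : Int) : Prop := n ≠ 0
instance (n : Int) (s : Int) : Decidable (Pre_solution n s) := by unfold Pre_solution; infer_instance
def pvWitness_solution : Int × Int := (3, 7)

def Spec_solution (n : Int) (s : Int) (out : List Int) : Prop := out = solution_alt n s
instance (n : Int) (s : Int) (out : List Int) : Decidable (Spec_solution n s out) := by unfold Spec_solution; infer_instance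

-- ===== CLAIM (what is proved, stated in full; the proofs are below) =====
def Claim_equal_solution : Prop := ∀ (n : Int) (s : Int), Dom_solution n s → Pre_solution n s → Spec_solution n s (solution n s)

-- ===== LEMMAS AND PROOFS =====

-- A's increment loop on a replicate list: after k steps the first k entries are v+1.
lemma loop_replicate (v : Int) : ∀ (k m : Nat), k ≤ m →
    (PySem.List.pyRange 0 k 1).foldl
      (fun acc i => PySem.List.pySetD acc i (PySem.List.pyGetD acc i 0 + 1))
      (List.replicate m v)
    = List.replicate k (v + 1) ++ List.replicate (m - k) v := by
  intro k
  induction k with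
  | zero => intro m _; simp [PySem.List.pyRange_one_eq_nil]
  | succ k ih =>
    intro m hkm
    have h1 : PySem.List.pyRange 0 ((k : Int) + 1) 1
        = PySem.List.pyRange 0 (k : Int) 1 ++ [(k : Int)] :=
      PySem.List.pyRange_one_succ_right (by positivity)
    have hcast : ((k + 1 : Nat) : Int) = (k : Int) + 1 := by push_cast; ring
    rw [hcast, h1, List.foldl_append, ih m (by omega)]
    simp only [List.foldl_cons, List.foldl_nil]
    have hget : PySem.List.pyGetD (List.replicate k (v + 1) ++ List.replicate (m - k) v) (k : Int) 0 = v := by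
      rw [PySem.List.pyGetD_natCast]
      rw [List.getD_eq_getElem?_getD, List.getElem?_append_right (by simp)]
      simp [show k < m by omega]
    rw [hget, PySem.List.pySetD_natCast]
    have hrep : List.replicate (m - k) v = v :: List.replicate (m - (k + 1)) v := by
      have : m - k = (m - (k + 1)) + 1 := by omega
      rw [this, List.replicate_succ]
    rw [hrep, List.set_append_right _ _ (by simp)]
    simp [List.replicate_succ' (n := k)]

-- Uniqueness of the sorted order for a two-valued multiset (stable sort irrelevant here).
lemma sorted_two_blocks (x y : Int) (hxy : x ≤ y) (a b : Nat) :
    PySem.List.sorted (List.replicate a y ++ List.replicate b x) id false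
    = List.replicate b x ++ List.replicate a y := by
  apply List.Perm.eq_of_pairwise (le := (· ≤ · : Int → Int → Prop))
    (fun u w _ _ h1 h2 => le_antisymm h1 h2)
  · have h := PySem.List.sorted_pairwise (xs := List.replicate a y ++ List.replicate b x)
      (key := (id : Int → Int))
    simpa using h
  · rw [List.pairwise_append]
    refine ⟨List.pairwise_replicate.mpr (by simp), List.pairwise_replicate.mpr (by simp), ?_⟩
    intro u hu w hw
    rw [List.eq_of_mem_replicate hu, List.eq_of_mem_replicate hw]
    exact hxy
  · exact (PySem.List.sorted_perm _ _ _).trans List.perm_append_comm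

-- B's greedy loop: over the countdown range it produces the two sorted blocks in closed form.
lemma greedy (k : Nat) : ∀ (t : Int) (acc : List Int), 0 < k →
    ((PySem.List.pyRange (k : Int) 0 (-1)).foldl
      (fun (st : List Int × Int) j =>
        let v := PySem.Int.floordiv st.2 j
        (st.1 ++ [v], st.2 - v)) (acc, t)).1
    = acc ++ List.replicate (k - (PySem.Int.mod t k).toNat) (PySem.Int.floordiv t k)
          ++ List.replicate (PySem.Int.mod t k).toNat (PySem.Int.floordiv t k + 1) := by
  induction k with
  | zero => intro _ _ h; omega
  | succ k ih =>
    intro t acc _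
    set q := PySem.Int.floordiv t (k + 1 : Nat) with hq
    set r := PySem.Int.mod t (k + 1 : Nat) with hr
    have hk1 : (0 : Int) < (k + 1 : Nat) := by positivity
    have hr0 : 0 ≤ r := PySem.Int.mod_nonneg t hk1
    have hrlt : r < (k + 1 : Nat) := PySem.Int.mod_lt t hk1
    have hqr : q * (k + 1 : Nat) + r = t := PySem.Int.floordiv_mul_add_mod t _
    have hcons : PySem.List.pyRange ((k + 1 : Nat) : Int) 0 (-1)
        = ((k + 1 : Nat) : Int) :: PySem.List.pyRange (((k + 1 : Nat) : Int) - 1) 0 (-1) :=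
      PySem.List.pyRange_neg_one_cons (by positivity)
    rw [hcons]
    simp only [List.foldl_cons]
    have hstep : (((k + 1 : Nat) : Int) - 1) = (k : Nat) := by push_cast; ring
    rw [hstep]
    push_cast at hqr hrlt
    rcases Nat.eq_zero_or_pos k with hk0 | hkpos
    · -- k = 0: range is empty, single slot
      subst hk0
      have hnil : PySem.List.pyRange ((0 : Nat) : Int) 0 (-1) = [] :=
        PySem.List.pyRange_neg_one_eq_nil (by simp)
      rw [hnil]
      have hr1 : r = 0 := by omega
      simp [hr1, List.replicate_succ]
      omega
    · -- k ≥ 1: apply IH to t - q with k slots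
      rw [ih (t - q) _ hkpos]
      have hkI : (0 : Int) < (k : Nat) := by exact_mod_cast hkpos
      have hdec := PySem.Int.floordiv_mul_add_mod (t - q) ((k : Nat) : Int)
      by_cases hcase : r = (k : Int)
      · -- remainder fills all remaining slots: t - q = (q+1)*k
        have hfd : PySem.Int.floordiv (t - q) ((k : Nat) : Int) = q + 1 := by
          rw [PySem.Int.floordiv_eq_iff_of_pos hkI]
          constructor <;> nlinarith
        rw [hfd] at hdec
        have hmd : PySem.Int.mod (t - q) ((k : Nat) : Int) = 0 := by nlinarith
        rw [hfd, hmd]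
        have hrt : r.toNat = k := by omega
        simp only [hrt, Int.toNat_zero, List.replicate_zero, List.append_nil, Nat.sub_zero]
        have hone : k + 1 - k = 1 := by omega
        rw [hone]
        simp [List.replicate_succ]
        rw [hq, PySem.Int.floordiv_eq_ediv_of_pos hk1]
        push_cast
        ring
      · -- r < k: quotient and remainder unchanged
        have hrk : r < (k : Int) := by omega
        have hfd : PySem.Int.floordiv (t - q) ((k : Nat) : Int) = q := by
          rw [PySem.Int.floordiv_eq_iff_of_pos hkI]
          constructor <;> nlinarith
        rw [hfd] at hdec
        have hmd : PySem.Int.mod (t - q) ((k : Nat) : Int) = r := by nlinarith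
        rw [hfd, hmd]
        have hsub : k + 1 - r.toNat = (k - r.toNat) + 1 := by omega
        rw [hsub, List.replicate_succ]
        simp
        rw [hq, PySem.Int.floordiv_eq_ediv_of_pos hk1]
        push_cast
        ring

-- ===== VERDICT (by name: the statement is the Claim_ definition above) =====
theorem solution_spec : Claim_equal_solution := by
  intro n s _ hn
  unfold Spec_solution solution solution_alt
  simp only []
  set mox := PySem.Int.floordiv s n with hmox
  set na := PySem.Int.mod s n with hna
  by_cases h : mox ≤ 0
  · simp [h]
  · simp only [h, if_false]
    rcases lt_trichotomy n 0 with hneg | hzero | hpos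
    · -- n < 0: both sides are []
      have hb := PySem.Int.mod_neg_bounds (a := s) hneg
      have h1 : PySem.List.pyRange 0 na 1 = [] := PySem.List.pyRange_one_eq_nil (by omega)
      have h2 : n.toNat = 0 := by omega
      have h3 : PySem.List.pyRange n 0 (-1) = [] := PySem.List.pyRange_neg_one_eq_nil (by omega)
      rw [h1, h2, h3]
      simp [PySem.List.sorted]
    · exact absurd hzero hn
    · -- n > 0: 0 ≤ na < n; A's sorted result and B's greedy result are the same two blocks
      have hge : 0 ≤ na := PySem.Int.mod_nonneg s hpos
      have hlt : na < n := PySem.Int.mod_lt s hpos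
      have hnale : na.toNat ≤ n.toNat := by omega
      have hr : PySem.List.pyRange 0 na 1 = PySem.List.pyRange 0 ((na.toNat : Nat) : Int) 1 := by
        rw [Int.toNat_of_nonneg hge]
      rw [hr, loop_replicate mox na.toNat n.toNat hnale,
        sorted_two_blocks mox (mox + 1) (by omega)]
      have hcastn : (n : Int) = ((n.toNat : Nat) : Int) := by omega
      rw [hcastn, greedy n.toNat s [] (by omega)]
      have hq : PySem.Int.floordiv s ((n.toNat : Nat) : Int) = mox := by rw [← hcastn]
      have hm : PySem.Int.mod s ((n.toNat : Nat) : Int) = na := by rw [← hcastn]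
      rw [hq, hm]
      simp [max_eq_left hpos.le]
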